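-- pv_equiv track=rewrite | github.com/OleksandrHalushka/GeekHub | HT_3/task4.py | chinesean_horoscope
-- ===== SOURCE A (Python) =====
-- def chinesean_horoscope(year):
--     characters = {
--         'Rat': range(1900, 2022, 12),
--         'Bull': range(1901, 2022, 12),
--         'Tiger': range(1902, 2022, 12),
--         'Rabbit': range(1903, 2022, 12),
--         'Dragon': range(1904, 2022, 12),
--         'Snake': range(1905, 2022, 12),
--         'Horse': range(1906, 2022, 12),
--         'Goat': range(1907, 2022, 12),
--         'Monkey': range(1908, 2022, 12),
--         'Rooster': range(1909, 2022, 12),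
--         'Dog': range(1910, 2022, 12),
--         'Pig': range(1911, 2022, 12)
--     }
--     for key, value in characters.items():
--         if year in value:
--             return key
-- ===== SOURCE B (Python) =====
-- def chinesean_horoscope(year):
--     names = ['Rat', 'Bull', 'Tiger', 'Rabbit', 'Dragon', 'Snake',
--              'Horse', 'Goat', 'Monkey', 'Rooster', 'Dog', 'Pig']
--     if year in range(1900, 2022):
--         return names[(year - 1900) % 12]
-- ===== Notes on version B (the rewrite author's own statement) =====
-- stated objective: idiomatic
-- what changed: Replaces the scan over twelve per-animal step-12 ranges with a single interval guard plus a modulo index into an ordered list of the twelve names.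
import Mathlib
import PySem

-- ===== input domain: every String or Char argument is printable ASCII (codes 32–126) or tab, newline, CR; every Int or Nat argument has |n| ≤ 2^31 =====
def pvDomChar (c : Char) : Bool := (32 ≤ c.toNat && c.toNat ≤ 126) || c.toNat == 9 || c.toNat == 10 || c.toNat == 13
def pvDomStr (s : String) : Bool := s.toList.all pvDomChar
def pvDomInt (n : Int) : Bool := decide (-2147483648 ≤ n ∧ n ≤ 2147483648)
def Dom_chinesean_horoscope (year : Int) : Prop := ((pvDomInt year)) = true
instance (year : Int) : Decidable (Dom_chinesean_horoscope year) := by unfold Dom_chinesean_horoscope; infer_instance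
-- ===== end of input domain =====

-- B replaces A's scan over twelve step-12 ranges with one interval guard and a modulo index (idiomatic).

-- ===== PORT A =====
-- the dict 'characters' in insertion order: (key, range(start, 2022, 12))
def pvCharacters : List (String × List Int) :=
  [("Rat", PySem.List.pyRange 1900 2022 12),
   ("Bull", PySem.List.pyRange 1901 2022 12),
   ("Tiger", PySem.List.pyRange 1902 2022 12),
   ("Rabbit", PySem.List.pyRange 1903 2022 12),
   ("Dragon", PySem.List.pyRange 1904 2022 12),
   ("Snake", PySem.List.pyRange 1905 2022 12),
   ("Horse", PySem.List.pyRange 1906 2022 12),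
   ("Goat", PySem.List.pyRange 1907 2022 12),
   ("Monkey", PySem.List.pyRange 1908 2022 12),
   ("Rooster", PySem.List.pyRange 1909 2022 12),
   ("Dog", PySem.List.pyRange 1910 2022 12),
   ("Pig", PySem.List.pyRange 1911 2022 12)]

-- the 'for key, value in characters.items(): if year in value: return key' loop
def pvALoop (year : Int) : List (String × List Int) → Option String
  | [] => none
  | (key, value) :: rest => if year ∈ value then some key else pvALoop year rest

def chinesean_horoscope (year : Int) : Option String :=
  pvALoop year pvCharacters

-- ===== PORT B =====
def pvNames : List String :=
  ["Rat", "Bull", "Tiger", "Rabbit", "Dragon", "Snake",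
   "Horse", "Goat", "Monkey", "Rooster", "Dog", "Pig"]

-- 'if year in range(1900, 2022): return names[(year - 1900) % 12]'; the index is
-- always in range inside the guard, so pyGet?'s IndexError case never occurs.
def chinesean_horoscope_alt (year : Int) : Option String :=
  if year ∈ PySem.List.pyRange 1900 2022 1 then
    PySem.List.pyGet? pvNames (PySem.Int.mod (year - 1900) 12)
  else none

-- ===== PRECONDITION & SPEC =====
def Spec_chinesean_horoscope (year : Int) (out : Option String) : Prop := out = chinesean_horoscope_alt year
instance (year : Int) (out : Option String) : Decidable (Spec_chinesean_horoscope year out) := by unfold Spec_chinesean_horoscope; infer_instance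

-- ===== CLAIM (what is proved, stated in full; the proofs are below) =====
def Claim_equal_chinesean_horoscope : Prop := ∀ (year : Int), Dom_chinesean_horoscope year → Spec_chinesean_horoscope year (chinesean_horoscope year)

-- ===== LEMMAS AND PROOFS =====

theorem pvALoop_nil (year : Int) : pvALoop year [] = none := rfl

theorem pvALoop_cons (year : Int) (k : String) (v : List Int) (rest : List (String × List Int)) :
    pvALoop year ((k, v) :: rest) = if year ∈ v then some k else pvALoop year rest := rfl

theorem pvMod_eq (year : Int) : PySem.Int.mod (year - 1900) 12 = (year - 1900) % 12 := by
  show Int.fmod _ _ = _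
  rw [Int.fmod_eq_emod]
  norm_num

theorem pvOut_of_range (year : Int) (h : ¬ (1900 ≤ year ∧ year < 2022)) :
    chinesean_horoscope year = chinesean_horoscope_alt year := by
  have hb : chinesean_horoscope_alt year = none := by
    unfold chinesean_horoscope_alt
    rw [if_neg]
    rw [PySem.List.mem_pyRange_one]
    exact h
  rw [hb]
  unfold chinesean_horoscope pvCharacters
  rw [pvALoop_cons, if_neg (by rw [PySem.List.mem_pyRange_iff_of_pos (by norm_num : (0:Int) < 12)]; omega)]
  rw [pvALoop_cons, if_neg (by rw [PySem.List.mem_pyRange_iff_of_pos (by norm_num : (0:Int) < 12)]; omega)]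
  rw [pvALoop_cons, if_neg (by rw [PySem.List.mem_pyRange_iff_of_pos (by norm_num : (0:Int) < 12)]; omega)]
  rw [pvALoop_cons, if_neg (by rw [PySem.List.mem_pyRange_iff_of_pos (by norm_num : (0:Int) < 12)]; omega)]
  rw [pvALoop_cons, if_neg (by rw [PySem.List.mem_pyRange_iff_of_pos (by norm_num : (0:Int) < 12)]; omega)]
  rw [pvALoop_cons, if_neg (by rw [PySem.List.mem_pyRange_iff_of_pos (by norm_num : (0:Int) < 12)]; omega)]
  rw [pvALoop_cons, if_neg (by rw [PySem.List.mem_pyRange_iff_of_pos (by norm_num : (0:Int) < 12)]; omega)]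
  rw [pvALoop_cons, if_neg (by rw [PySem.List.mem_pyRange_iff_of_pos (by norm_num : (0:Int) < 12)]; omega)]
  rw [pvALoop_cons, if_neg (by rw [PySem.List.mem_pyRange_iff_of_pos (by norm_num : (0:Int) < 12)]; omega)]
  rw [pvALoop_cons, if_neg (by rw [PySem.List.mem_pyRange_iff_of_pos (by norm_num : (0:Int) < 12)]; omega)]
  rw [pvALoop_cons, if_neg (by rw [PySem.List.mem_pyRange_iff_of_pos (by norm_num : (0:Int) < 12)]; omega)]
  rw [pvALoop_cons, if_neg (by rw [PySem.List.mem_pyRange_iff_of_pos (by norm_num : (0:Int) < 12)]; omega)]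
  exact pvALoop_nil year

theorem pvCase0 (year : Int) (h1 : 1900 ≤ year) (h2 : year < 2022)
    (e : (year - 1900) % 12 = 0) : chinesean_horoscope year = some "Rat" := by
  unfold chinesean_horoscope pvCharacters
  rw [pvALoop_cons, if_pos (by rw [PySem.List.mem_pyRange_iff_of_pos (by norm_num : (0:Int) < 12)]; omega)]

theorem pvCase1 (year : Int) (h1 : 1900 ≤ year) (h2 : year < 2022)
    (e : (year - 1900) % 12 = 1) : chinesean_horoscope year = some "Bull" := by
  unfold chinesean_horoscope pvCharacters
  rw [pvALoop_cons, if_neg (by rw [PySem.List.mem_pyRange_iff_of_pos (by norm_num : (0:Int) < 12)]; omega)]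
  rw [pvALoop_cons, if_pos (by rw [PySem.List.mem_pyRange_iff_of_pos (by norm_num : (0:Int) < 12)]; omega)]

theorem pvCase2 (year : Int) (h1 : 1900 ≤ year) (h2 : year < 2022)
    (e : (year - 1900) % 12 = 2) : chinesean_horoscope year = some "Tiger" := by
  unfold chinesean_horoscope pvCharacters
  rw [pvALoop_cons, if_neg (by rw [PySem.List.mem_pyRange_iff_of_pos (by norm_num : (0:Int) < 12)]; omega)]
  rw [pvALoop_cons, if_neg (by rw [PySem.List.mem_pyRange_iff_of_pos (by norm_num : (0:Int) < 12)]; omega)]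
  rw [pvALoop_cons, if_pos (by rw [PySem.List.mem_pyRange_iff_of_pos (by norm_num : (0:Int) < 12)]; omega)]

theorem pvCase3 (year : Int) (h1 : 1900 ≤ year) (h2 : year < 2022)
    (e : (year - 1900) % 12 = 3) : chinesean_horoscope year = some "Rabbit" := by
  unfold chinesean_horoscope pvCharacters
  rw [pvALoop_cons, if_neg (by rw [PySem.List.mem_pyRange_iff_of_pos (by norm_num : (0:Int) < 12)]; omega)]
  rw [pvALoop_cons, if_neg (by rw [PySem.List.mem_pyRange_iff_of_pos (by norm_num : (0:Int) < 12)]; omega)]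
  rw [pvALoop_cons, if_neg (by rw [PySem.List.mem_pyRange_iff_of_pos (by norm_num : (0:Int) < 12)]; omega)]
  rw [pvALoop_cons, if_pos (by rw [PySem.List.mem_pyRange_iff_of_pos (by norm_num : (0:Int) < 12)]; omega)]

theorem pvCase4 (year : Int) (h1 : 1900 ≤ year) (h2 : year < 2022)
    (e : (year - 1900) % 12 = 4) : chinesean_horoscope year = some "Dragon" := by
  unfold chinesean_horoscope pvCharacters
  rw [pvALoop_cons, if_neg (by rw [PySem.List.mem_pyRange_iff_of_pos (by norm_num : (0:Int) < 12)]; omega)]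
  rw [pvALoop_cons, if_neg (by rw [PySem.List.mem_pyRange_iff_of_pos (by norm_num : (0:Int) < 12)]; omega)]
  rw [pvALoop_cons, if_neg (by rw [PySem.List.mem_pyRange_iff_of_pos (by norm_num : (0:Int) < 12)]; omega)]
  rw [pvALoop_cons, if_neg (by rw [PySem.List.mem_pyRange_iff_of_pos (by norm_num : (0:Int) < 12)]; omega)]
  rw [pvALoop_cons, if_pos (by rw [PySem.List.mem_pyRange_iff_of_pos (by norm_num : (0:Int) < 12)]; omega)]

theorem pvCase5 (year : Int) (h1 : 1900 ≤ year) (h2 : year < 2022)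
    (e : (year - 1900) % 12 = 5) : chinesean_horoscope year = some "Snake" := by
  unfold chinesean_horoscope pvCharacters
  rw [pvALoop_cons, if_neg (by rw [PySem.List.mem_pyRange_iff_of_pos (by norm_num : (0:Int) < 12)]; omega)]
  rw [pvALoop_cons, if_neg (by rw [PySem.List.mem_pyRange_iff_of_pos (by norm_num : (0:Int) < 12)]; omega)]
  rw [pvALoop_cons, if_neg (by rw [PySem.List.mem_pyRange_iff_of_pos (by norm_num : (0:Int) < 12)]; omega)]
  rw [pvALoop_cons, if_neg (by rw [PySem.List.mem_pyRange_iff_of_pos (by norm_num : (0:Int) < 12)]; omega)]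
  rw [pvALoop_cons, if_neg (by rw [PySem.List.mem_pyRange_iff_of_pos (by norm_num : (0:Int) < 12)]; omega)]
  rw [pvALoop_cons, if_pos (by rw [PySem.List.mem_pyRange_iff_of_pos (by norm_num : (0:Int) < 12)]; omega)]

theorem pvCase6 (year : Int) (h1 : 1900 ≤ year) (h2 : year < 2022)
    (e : (year - 1900) % 12 = 6) : chinesean_horoscope year = some "Horse" := by
  unfold chinesean_horoscope pvCharacters
  rw [pvALoop_cons, if_neg (by rw [PySem.List.mem_pyRange_iff_of_pos (by norm_num : (0:Int) < 12)]; omega)]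
  rw [pvALoop_cons, if_neg (by rw [PySem.List.mem_pyRange_iff_of_pos (by norm_num : (0:Int) < 12)]; omega)]
  rw [pvALoop_cons, if_neg (by rw [PySem.List.mem_pyRange_iff_of_pos (by norm_num : (0:Int) < 12)]; omega)]
  rw [pvALoop_cons, if_neg (by rw [PySem.List.mem_pyRange_iff_of_pos (by norm_num : (0:Int) < 12)]; omega)]
  rw [pvALoop_cons, if_neg (by rw [PySem.List.mem_pyRange_iff_of_pos (by norm_num : (0:Int) < 12)]; omega)]
  rw [pvALoop_cons, if_neg (by rw [PySem.List.mem_pyRange_iff_of_pos (by norm_num : (0:Int) < 12)]; omega)]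
  rw [pvALoop_cons, if_pos (by rw [PySem.List.mem_pyRange_iff_of_pos (by norm_num : (0:Int) < 12)]; omega)]

theorem pvCase7 (year : Int) (h1 : 1900 ≤ year) (h2 : year < 2022)
    (e : (year - 1900) % 12 = 7) : chinesean_horoscope year = some "Goat" := by
  unfold chinesean_horoscope pvCharacters
  rw [pvALoop_cons, if_neg (by rw [PySem.List.mem_pyRange_iff_of_pos (by norm_num : (0:Int) < 12)]; omega)]
  rw [pvALoop_cons, if_neg (by rw [PySem.List.mem_pyRange_iff_of_pos (by norm_num : (0:Int) < 12)]; omega)]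
  rw [pvALoop_cons, if_neg (by rw [PySem.List.mem_pyRange_iff_of_pos (by norm_num : (0:Int) < 12)]; omega)]
  rw [pvALoop_cons, if_neg (by rw [PySem.List.mem_pyRange_iff_of_pos (by norm_num : (0:Int) < 12)]; omega)]
  rw [pvALoop_cons, if_neg (by rw [PySem.List.mem_pyRange_iff_of_pos (by norm_num : (0:Int) < 12)]; omega)]
  rw [pvALoop_cons, if_neg (by rw [PySem.List.mem_pyRange_iff_of_pos (by norm_num : (0:Int) < 12)]; omega)]
  rw [pvALoop_cons, if_neg (by rw [PySem.List.mem_pyRange_iff_of_pos (by norm_num : (0:Int) < 12)]; omega)]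
  rw [pvALoop_cons, if_pos (by rw [PySem.List.mem_pyRange_iff_of_pos (by norm_num : (0:Int) < 12)]; omega)]

theorem pvCase8 (year : Int) (h1 : 1900 ≤ year) (h2 : year < 2022)
    (e : (year - 1900) % 12 = 8) : chinesean_horoscope year = some "Monkey" := by
  unfold chinesean_horoscope pvCharacters
  rw [pvALoop_cons, if_neg (by rw [PySem.List.mem_pyRange_iff_of_pos (by norm_num : (0:Int) < 12)]; omega)]
  rw [pvALoop_cons, if_neg (by rw [PySem.List.mem_pyRange_iff_of_pos (by norm_num : (0:Int) < 12)]; omega)]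
  rw [pvALoop_cons, if_neg (by rw [PySem.List.mem_pyRange_iff_of_pos (by norm_num : (0:Int) < 12)]; omega)]
  rw [pvALoop_cons, if_neg (by rw [PySem.List.mem_pyRange_iff_of_pos (by norm_num : (0:Int) < 12)]; omega)]
  rw [pvALoop_cons, if_neg (by rw [PySem.List.mem_pyRange_iff_of_pos (by norm_num : (0:Int) < 12)]; omega)]
  rw [pvALoop_cons, if_neg (by rw [PySem.List.mem_pyRange_iff_of_pos (by norm_num : (0:Int) < 12)]; omega)]
  rw [pvALoop_cons, if_neg (by rw [PySem.List.mem_pyRange_iff_of_pos (by norm_num : (0:Int) < 12)]; omega)]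
  rw [pvALoop_cons, if_neg (by rw [PySem.List.mem_pyRange_iff_of_pos (by norm_num : (0:Int) < 12)]; omega)]
  rw [pvALoop_cons, if_pos (by rw [PySem.List.mem_pyRange_iff_of_pos (by norm_num : (0:Int) < 12)]; omega)]

theorem pvCase9 (year : Int) (h1 : 1900 ≤ year) (h2 : year < 2022)
    (e : (year - 1900) % 12 = 9) : chinesean_horoscope year = some "Rooster" := by
  unfold chinesean_horoscope pvCharacters
  rw [pvALoop_cons, if_neg (by rw [PySem.List.mem_pyRange_iff_of_pos (by norm_num : (0:Int) < 12)]; omega)]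
  rw [pvALoop_cons, if_neg (by rw [PySem.List.mem_pyRange_iff_of_pos (by norm_num : (0:Int) < 12)]; omega)]
  rw [pvALoop_cons, if_neg (by rw [PySem.List.mem_pyRange_iff_of_pos (by norm_num : (0:Int) < 12)]; omega)]
  rw [pvALoop_cons, if_neg (by rw [PySem.List.mem_pyRange_iff_of_pos (by norm_num : (0:Int) < 12)]; omega)]
  rw [pvALoop_cons, if_neg (by rw [PySem.List.mem_pyRange_iff_of_pos (by norm_num : (0:Int) < 12)]; omega)]
  rw [pvALoop_cons, if_neg (by rw [PySem.List.mem_pyRange_iff_of_pos (by norm_num : (0:Int) < 12)]; omega)]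
  rw [pvALoop_cons, if_neg (by rw [PySem.List.mem_pyRange_iff_of_pos (by norm_num : (0:Int) < 12)]; omega)]
  rw [pvALoop_cons, if_neg (by rw [PySem.List.mem_pyRange_iff_of_pos (by norm_num : (0:Int) < 12)]; omega)]
  rw [pvALoop_cons, if_neg (by rw [PySem.List.mem_pyRange_iff_of_pos (by norm_num : (0:Int) < 12)]; omega)]
  rw [pvALoop_cons, if_pos (by rw [PySem.List.mem_pyRange_iff_of_pos (by norm_num : (0:Int) < 12)]; omega)]

theorem pvCase10 (year : Int) (h1 : 1900 ≤ year) (h2 : year < 2022)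
    (e : (year - 1900) % 12 = 10) : chinesean_horoscope year = some "Dog" := by
  unfold chinesean_horoscope pvCharacters
  rw [pvALoop_cons, if_neg (by rw [PySem.List.mem_pyRange_iff_of_pos (by norm_num : (0:Int) < 12)]; omega)]
  rw [pvALoop_cons, if_neg (by rw [PySem.List.mem_pyRange_iff_of_pos (by norm_num : (0:Int) < 12)]; omega)]
  rw [pvALoop_cons, if_neg (by rw [PySem.List.mem_pyRange_iff_of_pos (by norm_num : (0:Int) < 12)]; omega)]
  rw [pvALoop_cons, if_neg (by rw [PySem.List.mem_pyRange_iff_of_pos (by norm_num : (0:Int) < 12)]; omega)]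
  rw [pvALoop_cons, if_neg (by rw [PySem.List.mem_pyRange_iff_of_pos (by norm_num : (0:Int) < 12)]; omega)]
  rw [pvALoop_cons, if_neg (by rw [PySem.List.mem_pyRange_iff_of_pos (by norm_num : (0:Int) < 12)]; omega)]
  rw [pvALoop_cons, if_neg (by rw [PySem.List.mem_pyRange_iff_of_pos (by norm_num : (0:Int) < 12)]; omega)]
  rw [pvALoop_cons, if_neg (by rw [PySem.List.mem_pyRange_iff_of_pos (by norm_num : (0:Int) < 12)]; omega)]
  rw [pvALoop_cons, if_neg (by rw [PySem.List.mem_pyRange_iff_of_pos (by norm_num : (0:Int) < 12)]; omega)]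
  rw [pvALoop_cons, if_neg (by rw [PySem.List.mem_pyRange_iff_of_pos (by norm_num : (0:Int) < 12)]; omega)]
  rw [pvALoop_cons, if_pos (by rw [PySem.List.mem_pyRange_iff_of_pos (by norm_num : (0:Int) < 12)]; omega)]

theorem pvCase11 (year : Int) (h1 : 1900 ≤ year) (h2 : year < 2022)
    (e : (year - 1900) % 12 = 11) : chinesean_horoscope year = some "Pig" := by
  unfold chinesean_horoscope pvCharacters
  rw [pvALoop_cons, if_neg (by rw [PySem.List.mem_pyRange_iff_of_pos (by norm_num : (0:Int) < 12)]; omega)]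
  rw [pvALoop_cons, if_neg (by rw [PySem.List.mem_pyRange_iff_of_pos (by norm_num : (0:Int) < 12)]; omega)]
  rw [pvALoop_cons, if_neg (by rw [PySem.List.mem_pyRange_iff_of_pos (by norm_num : (0:Int) < 12)]; omega)]
  rw [pvALoop_cons, if_neg (by rw [PySem.List.mem_pyRange_iff_of_pos (by norm_num : (0:Int) < 12)]; omega)]
  rw [pvALoop_cons, if_neg (by rw [PySem.List.mem_pyRange_iff_of_pos (by norm_num : (0:Int) < 12)]; omega)]
  rw [pvALoop_cons, if_neg (by rw [PySem.List.mem_pyRange_iff_of_pos (by norm_num : (0:Int) < 12)]; omega)]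
  rw [pvALoop_cons, if_neg (by rw [PySem.List.mem_pyRange_iff_of_pos (by norm_num : (0:Int) < 12)]; omega)]
  rw [pvALoop_cons, if_neg (by rw [PySem.List.mem_pyRange_iff_of_pos (by norm_num : (0:Int) < 12)]; omega)]
  rw [pvALoop_cons, if_neg (by rw [PySem.List.mem_pyRange_iff_of_pos (by norm_num : (0:Int) < 12)]; omega)]
  rw [pvALoop_cons, if_neg (by rw [PySem.List.mem_pyRange_iff_of_pos (by norm_num : (0:Int) < 12)]; omega)]
  rw [pvALoop_cons, if_neg (by rw [PySem.List.mem_pyRange_iff_of_pos (by norm_num : (0:Int) < 12)]; omega)]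
  rw [pvALoop_cons, if_pos (by rw [PySem.List.mem_pyRange_iff_of_pos (by norm_num : (0:Int) < 12)]; omega)]

theorem pvIn_range (year : Int) (h : 1900 ≤ year ∧ year < 2022) :
    chinesean_horoscope year = chinesean_horoscope_alt year := by
  obtain ⟨h1, h2⟩ := h
  have hB : chinesean_horoscope_alt year = PySem.List.pyGet? pvNames ((year - 1900) % 12) := by
    unfold chinesean_horoscope_alt
    rw [if_pos (PySem.List.mem_pyRange_one.mpr ⟨h1, h2⟩), pvMod_eq]
  rw [hB]
  have hr : (year - 1900) % 12 = 0 ∨ (year - 1900) % 12 = 1 ∨ (year - 1900) % 12 = 2 ∨ (year - 1900) % 12 = 3 ∨ (year - 1900) % 12 = 4 ∨ (year - 1900) % 12 = 5 ∨ (year - 1900) % 12 = 6 ∨ (year - 1900) % 12 = 7 ∨ (year - 1900) % 12 = 8 ∨ (year - 1900) % 12 = 9 ∨ (year - 1900) % 12 = 10 ∨ (year - 1900) % 12 = 11 := by omega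
  rcases hr with e|e|e|e|e|e|e|e|e|e|e|e
  · rw [pvCase0 year h1 h2 e, e]; decide
  · rw [pvCase1 year h1 h2 e, e]; decide
  · rw [pvCase2 year h1 h2 e, e]; decide
  · rw [pvCase3 year h1 h2 e, e]; decide
  · rw [pvCase4 year h1 h2 e, e]; decide
  · rw [pvCase5 year h1 h2 e, e]; decide
  · rw [pvCase6 year h1 h2 e, e]; decide
  · rw [pvCase7 year h1 h2 e, e]; decide
  · rw [pvCase8 year h1 h2 e, e]; decide
  · rw [pvCase9 year h1 h2 e, e]; decide
  · rw [pvCase10 year h1 h2 e, e]; decide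
  · rw [pvCase11 year h1 h2 e, e]; decide

-- ===== VERDICT (by name: the statement is the Claim_ definition above) =====
theorem chinesean_horoscope_spec : Claim_equal_chinesean_horoscope := by
  intro year _
  unfold Spec_chinesean_horoscope
  by_cases h : 1900 ≤ year ∧ year < 2022
  · exact pvIn_range year h
  · exact pvOut_of_range year h
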